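-- pv_equiv track=rewrite | github.com/kaustubh2708/INFYTQ-fundamnetals-assignment | experiment47.py | encrypt_sentence
-- ===== SOURCE A (Python) =====
-- vow=['a','e','i','o','u','A','E','I','O','U']
--
-- def encrypt_sentence(sentence):
-- 	l=[]
-- 	list1=sentence.split(" ")
-- 	for i in range (0,len(list1)):
-- 		word=list1[i]
-- 		if((i+1)%2!=0):
-- 			l.append(word[::-1])
-- 		else:
-- 			vowel=[]
-- 			consonant=[]
-- 			for i in word:
-- 				if i in vow:
-- 					vowel.append(i)
-- 				else:
-- 					consonant.append(i)
-- 			consonant.extend(vowel)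
-- 			l.append("".join(consonant))
--
-- 	return " ".join(l)
-- ===== SOURCE B (Python) =====
-- vow=['a','e','i','o','u','A','E','I','O','U']
--
-- def encrypt_sentence(sentence):
--     words = [w[::-1] if i % 2 == 0 else "".join(sorted(w, key=lambda c: c in vow))
--              for i, w in enumerate(sentence.split(" "))]
--     return " ".join(words)
-- ===== Notes on version B (the rewrite author's own statement) =====
-- stated objective: idiomatic
-- what changed: The index loop with manual vowel/consonant bucket lists is replaced by a comprehension over enumerate that encrypts even-position words with one stable sort keyed on vowel-membership (consonants, key False, sort before vowels while each group keeps its order).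
import Mathlib
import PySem

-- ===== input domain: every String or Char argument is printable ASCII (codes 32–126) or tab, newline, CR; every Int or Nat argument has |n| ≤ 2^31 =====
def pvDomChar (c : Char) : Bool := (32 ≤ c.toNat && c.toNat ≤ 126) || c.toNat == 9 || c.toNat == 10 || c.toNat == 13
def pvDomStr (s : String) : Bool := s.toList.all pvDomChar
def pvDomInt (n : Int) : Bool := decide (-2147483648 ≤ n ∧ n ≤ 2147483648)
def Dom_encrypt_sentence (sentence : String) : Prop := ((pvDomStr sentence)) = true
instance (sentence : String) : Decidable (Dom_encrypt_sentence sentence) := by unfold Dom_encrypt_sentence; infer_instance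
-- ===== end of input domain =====

-- B replaces A's index loop and manual vowel/consonant bucket lists by a map over
-- enumerate that sorts each even-position word stably by vowel-membership (idiomatic; not faster).


-- ===== PORT A =====
-- module constant vow (shared by both Pythons)
def vowList : List Char := ['a','e','i','o','u','A','E','I','O','U']

-- A's inner for-loop over the characters of an even-position word: two bucket lists
-- (vowel, consonant), then consonant.extend(vowel); "".join of 1-char strings is String.ofList (exact).
def encA_word (word : String) : String :=
  let p := word.toList.foldl
    (fun (s : List Char × List Char) c =>
      if c ∈ vowList then (s.1 ++ [c], s.2) else (s.1, s.2 ++ [c]))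
    ([], [])
  String.ofList (p.2 ++ p.1)

def encrypt_sentence (sentence : String) : String :=
  let list1 := (PySem.Str.split? sentence " ").getD []        -- sentence.split(" "), sep ≠ "" so never none
  let l := (PySem.List.pyRange 0 (list1.length : Int) 1).foldl
    (fun acc i =>
      let word := PySem.List.pyGetD list1 i ""                -- list1[i], index always in range
      if PySem.Int.mod (i + 1) 2 ≠ 0 then
        acc ++ [(PySem.Str.slice? word none none (-1)).getD ""]   -- word[::-1]
      else
        acc ++ [encA_word word])
    []
  PySem.Str.join " " l

-- ===== PORT B =====
-- "".join(sorted(word, key=lambda c: c in vow)) : stable sort by Bool key (False < True), joined (exact).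
def encB_word (word : String) : String :=
  String.ofList (PySem.List.sorted word.toList (fun c => decide (c ∈ vowList)) false)

def encrypt_sentence_alt (sentence : String) : String :=
  PySem.Str.join " "
    ((PySem.List.enumerate ((PySem.Str.split? sentence " ").getD []) 0).map
      (fun p =>
        if PySem.Int.mod p.1 2 = 0 then
          (PySem.Str.slice? p.2 none none (-1)).getD ""
        else
          encB_word p.2))

-- ===== PRECONDITION & SPEC =====
def Spec_encrypt_sentence (sentence : String) (out : String) : Prop := out = encrypt_sentence_alt sentence
instance (sentence : String) (out : String) : Decidable (Spec_encrypt_sentence sentence out) := by unfold Spec_encrypt_sentence; infer_instance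

-- ===== CLAIM (what is proved, stated in full; the proofs are below) =====
def Claim_equal_encrypt_sentence : Prop := ∀ (sentence : String), Dom_encrypt_sentence sentence → Spec_encrypt_sentence sentence (encrypt_sentence sentence)

-- ===== LEMMAS AND PROOFS =====

-- the Bool sort key used by B
def vkey (c : Char) : Bool := decide (c ∈ vowList)

-- inserting a consonant into consonants ++ vowels puts it right after the consonants
theorem insertBy_cons_block (x : Char) (hx : vkey x = false) :
    ∀ (cons vows : List Char), (∀ y ∈ cons, vkey y = false) → (∀ y ∈ vows, vkey y = true) →
    PySem.List.insertBy (fun a b => decide (vkey a < vkey b)) x (cons ++ vows) = cons ++ x :: vows := by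
  intro cons
  induction cons with
  | nil =>
      intro vows _ hv
      cases vows with
      | nil => simp [PySem.List.insertBy]
      | cons v vs =>
          have hv' : vkey v = true := hv v (by simp)
          simp [PySem.List.insertBy, hx, hv']
  | cons c cs ih =>
      intro vows hc hv
      have hcf : vkey c = false := hc c (by simp)
      have hb : decide (vkey x < vkey c) = false := by simp [hx, hcf]
      simp only [List.cons_append, PySem.List.insertBy, hb, Bool.false_eq_true, if_false]
      exact congrArg (c :: ·) (ih vows (fun y hy => hc y (List.mem_cons_of_mem _ hy)) hv)

-- inserting a vowel appends it at the end
theorem insertBy_vow (x : Char) (hx : vkey x = true) (ys : List Char) :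
    PySem.List.insertBy (fun a b => decide (vkey a < vkey b)) x ys = ys ++ [x] := by
  apply PySem.List.insertBy_of_forall_not_before
  intro y _
  simp [hx]

-- the insertion-sort fold keeps consonants before vowels, each in input order
theorem foldl_insertBy_partition :
    ∀ (cs cons vows : List Char), (∀ y ∈ cons, vkey y = false) → (∀ y ∈ vows, vkey y = true) →
    cs.foldl (fun acc x => PySem.List.insertBy (fun a b => decide (vkey a < vkey b)) x acc) (cons ++ vows)
      = (cons ++ cs.filter (fun c => !vkey c)) ++ (vows ++ cs.filter vkey) := by
  intro cs
  induction cs with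
  | nil => intro cons vows _ _; simp
  | cons x xs ih =>
      intro cons vows hc hv
      cases hx : vkey x with
      | false =>
          simp only [List.foldl_cons, insertBy_cons_block x hx cons vows hc hv]
          have := ih (cons ++ [x]) vows
            (by intro y hy; rcases List.mem_append.1 hy with h | h
                · exact hc y h
                · simp at h; subst h; exact hx) hv
          simp only [List.append_assoc, List.singleton_append] at this
          rw [this]
          simp [hx]
      | true =>
          simp only [List.foldl_cons]
          rw [show PySem.List.insertBy (fun a b => decide (vkey a < vkey b)) x (cons ++ vows)
                = cons ++ (vows ++ [x]) by
              rw [insertBy_vow x hx]; simp]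
          have := ih cons (vows ++ [x]) hc
            (by intro y hy; rcases List.mem_append.1 hy with h | h
                · exact hv y h
                · simp at h; subst h; exact hx)
          rw [this]
          simp [hx]

-- B's stable sort by vowel-membership is exactly "consonants then vowels, in order"
theorem sorted_vkey_eq (cs : List Char) :
    PySem.List.sorted cs vkey false = cs.filter (fun c => !vkey c) ++ cs.filter vkey := by
  rw [PySem.List.sorted_eq_foldl_insertBy]
  have := foldl_insertBy_partition cs [] []
    (by intro y hy; simp at hy) (by intro y hy; simp at hy)
  simpa using this

-- A's two-bucket fold computes the two filters
theorem bucket_fold (cs : List Char) :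
    ∀ (a b : List Char),
    cs.foldl (fun (s : List Char × List Char) c =>
        if c ∈ vowList then (s.1 ++ [c], s.2) else (s.1, s.2 ++ [c])) (a, b)
      = (a ++ cs.filter vkey, b ++ cs.filter (fun c => !vkey c)) := by
  induction cs with
  | nil => intro a b; simp
  | cons x xs ih =>
      intro a b
      by_cases hx : x ∈ vowList
      · simp only [List.foldl_cons, if_pos hx, ih]
        simp [vkey, hx]
      · simp only [List.foldl_cons, if_neg hx, ih]
        simp [vkey, hx]

-- per-word: A's bucket construction equals B's keyed sort
theorem word_eq (w : String) : encA_word w = encB_word w := by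
  unfold encA_word encB_word
  rw [bucket_fold w.toList [] []]
  have : (fun c => decide (c ∈ vowList)) = vkey := by funext c; rfl
  rw [this, sorted_vkey_eq]
  simp

-- parity of the branch tests agrees
theorem parity_eq (i : Int) : (PySem.Int.mod (i + 1) 2 ≠ 0) ↔ (PySem.Int.mod i 2 = 0) := by
  rw [PySem.Int.mod_eq_emod_of_pos (a := i + 1) (by norm_num),
      PySem.Int.mod_eq_emod_of_pos (a := i) (by norm_num)]
  omega

-- ===== VERDICT (by name: the statement is the Claim_ definition above) =====
theorem encrypt_sentence_spec : Claim_equal_encrypt_sentence := by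
  intro s _
  unfold Spec_encrypt_sentence
  show encrypt_sentence s = encrypt_sentence_alt s
  simp only [encrypt_sentence, encrypt_sentence_alt]
  generalize (PySem.Str.split? s " ").getD [] = ws
  congr 1
  rw [PySem.List.enumerate_eq_map_pyRange (d := ""), List.map_map]
  have h1 : ∀ (acc : List String) (i : Int),
      (fun acc i =>
        if PySem.Int.mod (i + 1) 2 ≠ 0 then
          acc ++ [(PySem.Str.slice? (PySem.List.pyGetD ws i "") none none (-1)).getD ""]
        else acc ++ [encA_word (PySem.List.pyGetD ws i "")]) acc i
      = acc ++ [(fun i =>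
          if PySem.Int.mod i 2 = 0 then
            (PySem.Str.slice? (PySem.List.pyGetD ws i "") none none (-1)).getD ""
          else encB_word (PySem.List.pyGetD ws i "")) i] := by
    intro acc i
    dsimp only
    by_cases h : PySem.Int.mod i 2 = 0
    · rw [if_pos ((parity_eq i).2 h), if_pos h]
    · rw [if_neg (fun hc => h ((parity_eq i).1 hc)), if_neg h, word_eq]
  calc (PySem.List.pyRange 0 (ws.length : Int) 1).foldl
        (fun acc i =>
          if PySem.Int.mod (i + 1) 2 ≠ 0 then
            acc ++ [(PySem.Str.slice? (PySem.List.pyGetD ws i "") none none (-1)).getD ""]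
          else acc ++ [encA_word (PySem.List.pyGetD ws i "")]) []
      = (PySem.List.pyRange 0 (ws.length : Int) 1).foldl
        (fun acc i => acc ++ [(fun i =>
          if PySem.Int.mod i 2 = 0 then
            (PySem.Str.slice? (PySem.List.pyGetD ws i "") none none (-1)).getD ""
          else encB_word (PySem.List.pyGetD ws i "")) i]) [] := by
        exact PySem.List.foldl_congr_mem _ _ _ _ (fun acc x _ => h1 acc x)
    _ = _ := by
        rw [PySem.List.foldl_append_singleton_eq_map]
        simp [Function.comp]
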